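-- pv_equiv track=rewrite | github.com/pattonga/Symmetric-Weakly-Separated-Collection-Generator | FindBreakers.py | find_non_weakly_separated
-- ===== SOURCE A (Python) =====
-- def weakly_separated_correct(A, B, n):
--     A_minus_B = sorted(set(A) - set(B))
--     B_minus_A = sorted(set(B) - set(A))
--     combined = sorted(set(A_minus_B + B_minus_A))
--
--     for i in range(len(combined)):
--         for j in range(i + 1, len(combined)):
--             for k in range(j + 1, len(combined)):
--                 for l in range(k + 1, len(combined)):
--                     a, b, c, d = combined[i], combined[j], combined[k], combined[l]
--                     if {a, c}.issubset(A_minus_B) and {b, d}.issubset(B_minus_A):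
--                         return False
--                     if {a, c}.issubset(B_minus_A) and {b, d}.issubset(A_minus_B):
--                         return False
--     return True
--
-- def find_non_weakly_separated(subsets, n):
--     bad_pairs = []
--     conflict_map = {i: [] for i in range(len(subsets))}
--     for i in range(len(subsets)):
--         for j in range(i + 1, len(subsets)):
--             A = subsets[i]
--             B = subsets[j]
--             if not weakly_separated_correct(A, B, n):
--                 bad_pairs.append((i, j, A, B))
--                 conflict_map[i].append(j)
--                 conflict_map[j].append(i)
--     return bad_pairs, conflict_map
-- ===== SOURCE B (Python) =====
-- def _weakly_separated(sa, sb):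
--     # weakly separated iff the sorted symmetric difference, labelled by which
--     # side each element belongs to, has fewer than 4 alternation blocks
--     blocks = 0
--     last = None
--     for x in sorted(sa ^ sb):
--         lab = x in sa
--         if lab != last:
--             blocks += 1
--             last = lab
--     return blocks < 4
--
-- def find_non_weakly_separated(subsets, n):
--     sets = [set(s) for s in subsets]
--     bad_pairs = []
--     conflict_map = {i: [] for i in range(len(subsets))}
--     for i in range(len(subsets)):
--         for j in range(i + 1, len(subsets)):
--             if not _weakly_separated(sets[i], sets[j]):
--                 bad_pairs.append((i, j, subsets[i], subsets[j]))
--                 conflict_map[i].append(j)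
--                 conflict_map[j].append(i)
--     return bad_pairs, conflict_map
-- ===== Notes on version B (the rewrite author's own statement) =====
-- stated objective: faster
-- what changed: Per pair, A searches all quadruples a<b<c<d of the combined symmetric difference for an A-B-A-B membership pattern (O(m^4)); B labels each element of the sorted symmetric difference by the side it comes from and counts alternation blocks in one linear pass (the pattern exists iff there are >= 4 blocks).
import Mathlib
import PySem

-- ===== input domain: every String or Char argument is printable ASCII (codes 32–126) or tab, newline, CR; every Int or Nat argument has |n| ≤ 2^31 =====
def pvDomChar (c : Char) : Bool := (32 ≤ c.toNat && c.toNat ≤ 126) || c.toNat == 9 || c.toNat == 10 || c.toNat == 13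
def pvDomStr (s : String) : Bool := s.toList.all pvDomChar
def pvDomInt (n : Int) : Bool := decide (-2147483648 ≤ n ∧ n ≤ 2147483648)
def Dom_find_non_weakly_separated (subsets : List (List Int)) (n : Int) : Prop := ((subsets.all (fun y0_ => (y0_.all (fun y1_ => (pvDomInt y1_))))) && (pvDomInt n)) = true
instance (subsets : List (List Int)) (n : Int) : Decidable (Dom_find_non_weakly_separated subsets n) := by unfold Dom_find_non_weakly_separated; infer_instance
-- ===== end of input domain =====

-- B replaces A's per-pair quadruple index scan by a single linear pass that counts
-- label-alternation blocks over the sorted symmetric difference (same return value, different algorithm).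


-- ===== PORT A =====
-- weakly_separated_correct: the quadruple loop with early 'return False' ported as nested .any
-- (same truth value as the early return); every combined[i] access is in range, pyGetD is exact there.
def pvWSC (A B : List Int) (n : Int) : Bool :=
  let AmB := PySem.List.sorted (PySem.Set.diff (PySem.Set.ofList A) (PySem.Set.ofList B)) (fun x => x) false
  let BmA := PySem.List.sorted (PySem.Set.diff (PySem.Set.ofList B) (PySem.Set.ofList A)) (fun x => x) false
  let combined := PySem.List.sorted (PySem.Set.ofList (AmB ++ BmA)) (fun x => x) false
  let m : Int := PySem.List.len combined
  !((PySem.List.pyRange 0 m 1).any fun i =>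
    (PySem.List.pyRange (i+1) m 1).any fun j =>
    (PySem.List.pyRange (j+1) m 1).any fun k =>
    (PySem.List.pyRange (k+1) m 1).any fun l =>
      let a := PySem.List.pyGetD combined i 0
      let b := PySem.List.pyGetD combined j 0
      let c := PySem.List.pyGetD combined k 0
      let d := PySem.List.pyGetD combined l 0
      (decide (a ∈ AmB) && decide (c ∈ AmB) && decide (b ∈ BmA) && decide (d ∈ BmA)) ||
      (decide (a ∈ BmA) && decide (c ∈ BmA) && decide (b ∈ AmB) && decide (d ∈ AmB)))

def find_non_weakly_separated (subsets : List (List Int)) (n : Int) : (List (Int × Int × List Int × List Int)) × (List (Int × List Int)) :=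
  let N : Int := PySem.List.len subsets
  let cm0 : PySem.Dict Int (List Int) := PySem.Dict.ofList ((PySem.List.pyRange 0 N 1).map (fun i => (i, ([] : List Int))))
  let r := (PySem.List.pyRange 0 N 1).foldl (fun st i =>
      (PySem.List.pyRange (i+1) N 1).foldl (fun (st : (List (Int × Int × List Int × List Int)) × PySem.Dict Int (List Int)) j =>
        let A := PySem.List.pyGetD subsets i []
        let B := PySem.List.pyGetD subsets j []
        if !(pvWSC A B n) then
          (st.1 ++ [(i, j, A, B)],
           (st.2.modify i [] (· ++ [j])).modify j [] (· ++ [i]))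
        else st) st) (([], cm0) : (List (Int × Int × List Int × List Int)) × PySem.Dict Int (List Int))
  (r.1, r.2.items)

-- ===== PORT B =====
-- _weakly_separated: one pass over the sorted symmetric difference counting alternation blocks.
def pvWS (sa sb : PySem.Set Int) : Bool :=
  let st := (PySem.List.sorted (PySem.Set.symmDiff sa sb) (fun x => x) false).foldl
      (fun (st : Int × Option Bool) x =>
        let lab := decide (x ∈ sa)
        if (some lab ≠ st.2) then (st.1 + 1, some lab) else st) ((0 : Int), (none : Option Bool))
  decide (st.1 < 4)

def find_non_weakly_separated_alt (subsets : List (List Int)) (n : Int) : (List (Int × Int × List Int × List Int)) × (List (Int × List Int)) :=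
  let sets : List (PySem.Set Int) := subsets.map (fun s => PySem.Set.ofList s)
  let N : Int := PySem.List.len subsets
  let cm0 : PySem.Dict Int (List Int) := PySem.Dict.ofList ((PySem.List.pyRange 0 N 1).map (fun i => (i, ([] : List Int))))
  let r := (PySem.List.pyRange 0 N 1).foldl (fun st i =>
      (PySem.List.pyRange (i+1) N 1).foldl (fun (st : (List (Int × Int × List Int × List Int)) × PySem.Dict Int (List Int)) j =>
        if !(pvWS (PySem.List.pyGetD sets i []) (PySem.List.pyGetD sets j [])) then
          (st.1 ++ [(i, j, PySem.List.pyGetD subsets i [], PySem.List.pyGetD subsets j [])],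
           (st.2.modify i [] (· ++ [j])).modify j [] (· ++ [i]))
        else st) st) (([], cm0) : (List (Int × Int × List Int × List Int)) × PySem.Dict Int (List Int))
  (r.1, r.2.items)

-- ===== PRECONDITION & SPEC =====
def Spec_find_non_weakly_separated (subsets : List (List Int)) (n : Int) (out : (List (Int × Int × List Int × List Int)) × (List (Int × List Int))) : Prop := out = find_non_weakly_separated_alt subsets n
instance (subsets : List (List Int)) (n : Int) (out : (List (Int × Int × List Int × List Int)) × (List (Int × List Int))) : Decidable (Spec_find_non_weakly_separated subsets n out) := by unfold Spec_find_non_weakly_separated; infer_instance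

-- ===== CLAIM =====
def Claim_equal_find_non_weakly_separated : Prop := ∀ (subsets : List (List Int)) (n : Int), Dom_find_non_weakly_separated subsets n → Spec_find_non_weakly_separated subsets n (find_non_weakly_separated subsets n)

-- ===== LEMMAS AND PROOFS =====
def pvChg : Bool → List Bool → Nat
  | _, [] => 0
  | b, a :: t => (if a = b then 0 else 1) + pvChg a t

def pvBlocks : List Bool → Nat
  | [] => 0
  | a :: t => 1 + pvChg a t

def pvAltList : Bool → Nat → List Bool
  | _, 0 => []
  | s, k+1 => s :: pvAltList (!s) k

def pvHasQuad (bs : List Bool) : Prop :=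
  ∃ (i j k l : Nat), ∃ h1 : i < j, ∃ h2 : j < k, ∃ h3 : k < l, ∃ h4 : l < bs.length,
    bs[i]'(by omega) = bs[k]'(by omega) ∧ bs[j]'(by omega) = bs[l]'(by omega) ∧
    bs[i]'(by omega) ≠ bs[j]'(by omega)

theorem pvChg_le_succ (t : List Bool) (b c : Bool) : pvChg b t ≤ pvChg c t + 1 := by
  cases t with
  | nil => simp [pvChg]
  | cons a t => simp only [pvChg]; split_ifs <;> omega

theorem pvAltList_sublist (t : List Bool) (b : Bool) (k : Nat) (h : k ≤ pvChg b t) :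
    (pvAltList (!b) k).Sublist t := by
  induction t generalizing b k with
  | nil => simp [pvChg] at h; simp [h, pvAltList]
  | cons a t ih =>
    by_cases hab : a = b
    · subst hab
      simp [pvChg] at h
      exact (ih a k h).cons a
    · have ha : a = !b := by cases a <;> cases b <;> simp_all
      simp only [pvChg, if_neg hab] at h
      cases k with
      | zero => simp [pvAltList]
      | succ k =>
        have := (ih a k (by omega)).cons₂ a
        subst ha
        simpa [pvAltList, Bool.not_not] using this

theorem pvAltList_le_chg (t : List Bool) (b : Bool) (k : Nat)
    (h : (pvAltList (!b) k).Sublist t) : k ≤ pvChg b t := by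
  induction t generalizing b k with
  | nil =>
    cases k with
    | zero => omega
    | succ k => simp [pvAltList] at h
  | cons a t ih =>
    cases k with
    | zero => omega
    | succ k =>
      simp only [pvAltList] at h
      cases h with
      | cons _ h' =>
        have h1 := ih b (k+1) (by simpa [pvAltList] using h')
        have h2 := pvChg_le_succ t b a
        simp only [pvChg]; split_ifs with hab
        · subst hab; omega
        · omega
      | cons₂ _ h' =>
        have hk := ih (!b) k (by simpa [Bool.not_not] using h')
        have hab : ¬ ((!b) = b) := by cases b <;> simp
        simp only [pvChg, if_neg hab]
        have := pvChg_le_succ t (!b) b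
        omega

theorem pvAltList_le_blocks (bs : List Bool) (x : Bool) (k : Nat)
    (h : (pvAltList x k).Sublist bs) : k ≤ pvBlocks bs := by
  induction bs generalizing x k with
  | nil =>
    cases k with
    | zero => omega
    | succ k => simp [pvAltList] at h
  | cons a t ih =>
    cases k with
    | zero => omega
    | succ k =>
      simp only [pvAltList] at h
      cases h with
      | cons _ h' =>
        have h1 := ih x (k+1) (by simpa [pvAltList] using h')
        have h2 : pvBlocks t ≤ pvBlocks (a :: t) := by
          cases t with
          | nil => simp [pvBlocks]
          | cons c t' =>
            simp only [pvBlocks, pvChg]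
            split_ifs <;> omega
        omega
      | cons₂ _ h' =>
        have := pvAltList_le_chg t a k (by simpa [Bool.not_not] using h')
        simp only [pvBlocks]; omega

theorem pvBlocks_alt (bs : List Bool) (h : 4 ≤ pvBlocks bs) :
    ∃ x, (pvAltList x 4).Sublist bs := by
  cases bs with
  | nil => simp [pvBlocks] at h
  | cons a t =>
    refine ⟨a, ?_⟩
    simp only [pvBlocks] at h
    have := (pvAltList_sublist t a 3 (by omega)).cons₂ a
    simpa [pvAltList] using this

theorem pvBool4 (p q r s : Bool) :
    (((p && r && !q && !s) || (!p && !r && q && s)) = true) ↔ (p = r ∧ q = s ∧ p ≠ q) := by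
  revert p q r s; decide

theorem pvHasQuad_iff (bs : List Bool) : pvHasQuad bs ↔ 4 ≤ pvBlocks bs := by
  constructor
  · rintro ⟨i, j, k, l, h1, h2, h3, h4, e1, e2, e3⟩
    have hsub : (pvAltList (bs[i]'(by omega)) 4).Sublist bs := by
      have hp : List.Pairwise (· < ·)
          ([⟨i, by omega⟩, ⟨j, by omega⟩, ⟨k, by omega⟩, ⟨l, h4⟩] : List (Fin bs.length)) := by
        refine List.Pairwise.cons ?_ (List.Pairwise.cons ?_ (List.Pairwise.cons ?_ (List.pairwise_singleton _ _)))
        all_goals intro b hb; simp only [List.mem_cons, List.not_mem_nil, or_false] at hb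
        · rcases hb with rfl | rfl | rfl <;> exact Fin.mk_lt_mk.mpr (by omega)
        · rcases hb with rfl | rfl <;> exact Fin.mk_lt_mk.mpr (by omega)
        · rcases hb with rfl <;> exact Fin.mk_lt_mk.mpr (by omega)
      have hs := List.map_getElem_sublist hp
      simp only [List.map_cons, List.map_nil] at hs
      have hjb : bs[j]'(by omega) = !(bs[i]'(by omega)) := by
        revert e3; cases bs[i]'(by omega) <;> cases bs[j]'(by omega) <;> simp
      simpa [pvAltList, Bool.not_not, ← e1, ← e2, hjb] using hs
    exact pvAltList_le_blocks bs _ 4 hsub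
  · intro h
    obtain ⟨x, hsub⟩ := pvBlocks_alt bs h
    obtain ⟨is, heq, hpw⟩ := List.sublist_eq_map_getElem hsub
    have hlen : is.length = 4 := by
      have := congrArg List.length heq
      simpa [pvAltList] using this.symm
    rcases is with _ | ⟨i, _ | ⟨j, _ | ⟨k, _ | ⟨l, _ | ⟨m, rest⟩⟩⟩⟩⟩ <;> simp at hlen
    simp only [List.map_cons, List.map_nil, pvAltList, Bool.not_not, List.cons.injEq, and_true] at heq
    obtain ⟨e1, e2, e3, e4⟩ := heq
    simp only [List.pairwise_cons, List.mem_cons, List.not_mem_nil, or_false] at hpw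
    obtain ⟨hi, hj, hk, -⟩ := hpw
    have hij : i.val < j.val := Fin.lt_def.mp (hi j (Or.inl rfl))
    have hjk : j.val < k.val := Fin.lt_def.mp (hj k (Or.inl rfl))
    have hkl : k.val < l.val := Fin.lt_def.mp (hk l rfl)
    simp only [Fin.getElem_fin] at e1 e2 e3 e4
    refine ⟨i, j, k, l, by omega, by omega, by omega, l.isLt, ?_, ?_, ?_⟩
    · rw [← e1, ← e3]
    · rw [← e2, ← e4]
    · rw [← e1, ← e2]; cases x <;> simp

theorem pvFold_chg (bs : List Bool) (c : Int) (b : Bool) :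
    (bs.foldl (fun (st : Int × Option Bool) lab =>
      if (some lab ≠ st.2) then (st.1 + 1, some lab) else st) (c, some b)).1
      = c + pvChg b bs := by
  induction bs generalizing c b with
  | nil => simp [pvChg]
  | cons a t ih =>
    by_cases hab : a = b
    · subst hab
      rw [List.foldl_cons, if_neg (by simp), ih]
      simp [pvChg]
    · simp only [List.foldl_cons, pvChg, if_neg hab]
      rw [if_pos (by simp [hab])]
      rw [ih]; push_cast; omega

theorem pvFold_blocks (bs : List Bool) :
    (bs.foldl (fun (st : Int × Option Bool) lab =>
      if (some lab ≠ st.2) then (st.1 + 1, some lab) else st) ((0 : Int), none)).1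
      = (pvBlocks bs : Int) := by
  cases bs with
  | nil => simp [pvBlocks]
  | cons a t =>
    simp only [List.foldl_cons]
    rw [if_pos (by simp)]
    rw [pvFold_chg]
    simp [pvBlocks]

theorem pvAny_pyRange (a b : Int) (f : Int → Bool) :
    ((PySem.List.pyRange a b 1).any f = true) ↔ ∃ x : Int, (a ≤ x ∧ x < b) ∧ f x = true := by
  simp [List.any_eq_true, PySem.List.mem_pyRange_one]

theorem pvWSC_eq (A B : List Int) (n : Int) :
    pvWSC A B n = pvWS (PySem.Set.ofList A) (PySem.Set.ofList B) := by
  have nodupA := PySem.Set.nodup_ofList (xs := A)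
  have nodupB := PySem.Set.nodup_ofList (xs := B)
  set SA := PySem.Set.ofList A with hSA
  set SB := PySem.Set.ofList B with hSB
  set AmB := PySem.List.sorted (PySem.Set.diff SA SB) (fun x => x) false with hAmB
  set BmA := PySem.List.sorted (PySem.Set.diff SB SA) (fun x => x) false with hBmA
  set LA := PySem.List.sorted (PySem.Set.ofList (AmB ++ BmA)) (fun x => x) false with hLA
  set LB := PySem.List.sorted (PySem.Set.symmDiff SA SB) (fun x => x) false with hLB
  have memAmB : ∀ x, x ∈ AmB ↔ x ∈ SA ∧ x ∉ SB := by
    intro x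
    rw [hAmB, (PySem.List.sorted_perm _ _ _).mem_iff, PySem.Set.mem_diff]
  have memBmA : ∀ x, x ∈ BmA ↔ x ∈ SB ∧ x ∉ SA := by
    intro x
    rw [hBmA, (PySem.List.sorted_perm _ _ _).mem_iff, PySem.Set.mem_diff]
  have memLB : ∀ x, x ∈ LB ↔ ((x ∈ SA ∧ x ∉ SB) ∨ (x ∈ SB ∧ x ∉ SA)) := by
    intro x
    rw [hLB, (PySem.List.sorted_perm _ _ _).mem_iff, PySem.Set.mem_symmDiff]
  have memLA : ∀ x, x ∈ LA ↔ ((x ∈ SA ∧ x ∉ SB) ∨ (x ∈ SB ∧ x ∉ SA)) := by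
    intro x
    rw [hLA, (PySem.List.sorted_perm _ _ _).mem_iff]
    rw [show (x ∈ PySem.Set.ofList (AmB ++ BmA)) ↔ x ∈ AmB ++ BmA from PySem.Set.mem_ofList _ _]
    rw [List.mem_append, memAmB, memBmA]
  have ndLA : LA.Nodup := by
    rw [hLA]
    exact ((PySem.List.sorted_perm _ _ _).nodup_iff).mpr (PySem.Set.nodup_ofList _)
  have ndLB : LB.Nodup := by
    rw [hLB]
    exact ((PySem.List.sorted_perm _ _ _).nodup_iff).mpr
      (PySem.Set.nodup_symmDiff _ _ nodupA nodupB)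
  have hLAB : LA = LB :=
    PySem.List.eq_of_perm_of_pairwise_le_of_injective (fun x : Int => x) (fun _ _ h => h)
      ((List.perm_ext_iff_of_nodup ndLA ndLB).mpr (fun x => by rw [memLA, memLB]))
      (by rw [hLA]; exact PySem.List.sorted_pairwise _ _)
      (by rw [hLB]; exact PySem.List.sorted_pairwise _ _)
  -- the label list
  set f : Int → Bool := fun x => decide (x ∈ SA) with hf
  set bs : List Bool := LB.map f with hbs
  have hlen : bs.length = LB.length := by simp [hbs]
  have hdecA : ∀ x ∈ LB, decide (x ∈ AmB) = f x := by
    intro x hx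
    rcases (memLB x).mp hx with ⟨h1, h2⟩ | ⟨h1, h2⟩ <;>
      simp [memAmB, hf, h1, h2]
  have hdecB : ∀ x ∈ LB, decide (x ∈ BmA) = !f x := by
    intro x hx
    rcases (memLB x).mp hx with ⟨h1, h2⟩ | ⟨h1, h2⟩ <;>
      simp [memBmA, hf, h1, h2]
  -- B side equals blocks
  have hBside : pvWS SA SB = decide ((pvBlocks bs : Int) < 4) := by
    simp only [pvWS]
    rw [← hLB]
    have : (LB.foldl (fun (st : Int × Option Bool) x =>
        if (some (decide (x ∈ SA)) ≠ st.2) then (st.1 + 1, some (decide (x ∈ SA))) else st)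
        ((0 : Int), (none : Option Bool))).1 = (pvBlocks bs : Int) := by
      rw [hbs, hf]
      rw [← List.foldl_map (f := fun x => decide (x ∈ SA))
        (g := fun (st : Int × Option Bool) lab => if (some lab ≠ st.2) then (st.1 + 1, some lab) else st)]
      exact pvFold_blocks _
    simp only [ne_eq]
    simp only [ne_eq] at this
    rw [this]
  -- A side equals HasQuad
  have hAside : (pvWSC A B n = false) ↔ pvHasQuad bs := by
    simp only [pvWSC]
    rw [← hSA, ← hSB, ← hAmB, ← hBmA, ← hLA, hLAB]
    rw [Bool.not_eq_false']
    rw [pvAny_pyRange]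
    unfold pvHasQuad
    constructor
    · rintro ⟨i, ⟨hi0, him⟩, hi⟩
      rw [pvAny_pyRange] at hi
      obtain ⟨j, ⟨hj0, hjm⟩, hj⟩ := hi
      rw [pvAny_pyRange] at hj
      obtain ⟨k, ⟨hk0, hkm⟩, hk⟩ := hj
      rw [pvAny_pyRange] at hk
      obtain ⟨l, ⟨hl0, hlm⟩, hl⟩ := hk
      simp only [PySem.List.len_eq] at him hjm hkm hlm
      have hiN : (0:Int) ≤ i := hi0
      have hlN : l < (LB.length : Int) := hlm
      rw [PySem.List.pyGetD_eq_getElem LB 0 (by omega) (by simpa using him),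
          PySem.List.pyGetD_eq_getElem LB 0 (by omega) (by simpa using hkm),
          PySem.List.pyGetD_eq_getElem LB 0 (by omega) (by simpa using hjm),
          PySem.List.pyGetD_eq_getElem LB 0 (by omega) (by simpa using hlm)] at hl
      rw [hdecA _ (List.getElem_mem _), hdecA _ (List.getElem_mem _),
          hdecA _ (List.getElem_mem _), hdecA _ (List.getElem_mem _),
          hdecB _ (List.getElem_mem _), hdecB _ (List.getElem_mem _),
          hdecB _ (List.getElem_mem _), hdecB _ (List.getElem_mem _)] at hl
      rw [pvBool4] at hl
      obtain ⟨ha, hb, hc⟩ := hl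
      refine ⟨i.toNat, j.toNat, k.toNat, l.toNat, by omega, by omega, by omega, by rw [hlen]; omega,
        ?_, ?_, ?_⟩ <;>
        simp only [hbs, List.getElem_map] <;> assumption
    · rintro ⟨i, j, k, l, h1, h2, h3, h4, e1, e2, e3⟩
      rw [hlen] at h4
      simp only [hbs, List.getElem_map] at e1 e2 e3
      refine ⟨(i : Int), ?_, ?_⟩
      · constructor
        · omega
        · simp only [PySem.List.len_eq]; exact_mod_cast (by omega : i < LB.length)
      rw [pvAny_pyRange]
      refine ⟨(j : Int), ⟨by omega, by simp only [PySem.List.len_eq]; exact_mod_cast (by omega : j < LB.length)⟩, ?_⟩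
      rw [pvAny_pyRange]
      refine ⟨(k : Int), ⟨by omega, by simp only [PySem.List.len_eq]; exact_mod_cast (by omega : k < LB.length)⟩, ?_⟩
      rw [pvAny_pyRange]
      refine ⟨(l : Int), ⟨by omega, by simp only [PySem.List.len_eq]; exact_mod_cast h4⟩, ?_⟩
      rw [PySem.List.pyGetD_eq_getElem LB 0 (by omega) (by exact_mod_cast (by omega : i < LB.length)),
          PySem.List.pyGetD_eq_getElem LB 0 (by omega) (by exact_mod_cast (by omega : k < LB.length)),
          PySem.List.pyGetD_eq_getElem LB 0 (by omega) (by exact_mod_cast (by omega : j < LB.length)),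
          PySem.List.pyGetD_eq_getElem LB 0 (by omega) (by exact_mod_cast h4)]
      rw [hdecA _ (List.getElem_mem _), hdecA _ (List.getElem_mem _),
          hdecA _ (List.getElem_mem _), hdecA _ (List.getElem_mem _),
          hdecB _ (List.getElem_mem _), hdecB _ (List.getElem_mem _),
          hdecB _ (List.getElem_mem _), hdecB _ (List.getElem_mem _)]
      rw [pvBool4]
      simp only [Int.toNat_natCast]
      exact ⟨e1, e2, e3⟩
  rw [hBside]
  cases hW : pvWSC A B n with
  | false =>
    have hq := hAside.mp hW
    rw [pvHasQuad_iff] at hq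
    symm
    rw [decide_eq_false_iff_not]
    omega
  | true =>
    have hq : ¬ pvHasQuad bs := fun h => by simp [hAside.mpr h] at hW
    rw [pvHasQuad_iff] at hq
    symm
    rw [decide_eq_true_iff]
    omega

theorem find_non_weakly_separated_eq (subsets : List (List Int)) (n : Int) :
    find_non_weakly_separated subsets n = find_non_weakly_separated_alt subsets n := by
  have hws : ∀ i j : Int, pvWSC (PySem.List.pyGetD subsets i []) (PySem.List.pyGetD subsets j []) n
      = pvWS (PySem.List.pyGetD (subsets.map (fun s => PySem.Set.ofList s)) i [])
             (PySem.List.pyGetD (subsets.map (fun s => PySem.Set.ofList s)) j []) := by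
    intro i j
    rw [pvWSC_eq]
    have h1 := PySem.List.pyGetD_map (fun s => PySem.Set.ofList s) subsets i ([] : List Int)
    have h2 := PySem.List.pyGetD_map (fun s => PySem.Set.ofList s) subsets j ([] : List Int)
    exact congrArg₂ pvWS h1.symm h2.symm
  simp only [find_non_weakly_separated, find_non_weakly_separated_alt, hws]

-- ===== VERDICT =====
theorem find_non_weakly_separated_spec : Claim_equal_find_non_weakly_separated := by
  intro subsets n _
  unfold Spec_find_non_weakly_separated
  exact find_non_weakly_separated_eq subsets n
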